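-- pv_equiv track=rewrite | github.com/shawinsoranakom/CodeSnippets | ComplexMethod/cm042181.py | fft_next_good_size
-- ===== SOURCE A (Python) =====
-- def fft_next_good_size(n: int) -> int:
--     """
--     smallest composite of 2, 3, 5, 7, 11 that is >= n
--     inspired by pocketfft
--     """
--     if n <= 6:
--       return n
--     best, f2 = 2 * n, 1
--     while f2 < best:
--         f23 = f2
--         while f23 < best:
--             f235 = f23
--             while f235 < best:
--                 f2357 = f235
--                 while f2357 < best:
--                     f235711 = f2357
--                     while f235711 < best:
--                         best = f235711 if f235711 >= n else best
--                         f235711 *= 11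
--                     f2357 *= 7
--                 f235 *= 5
--             f23 *= 3
--         f2 *= 2
--     return best
-- ===== SOURCE B (Python) =====
-- def _is_11_smooth(x: int) -> bool:
--     for p in (2, 3, 5, 7, 11):
--         while x % p == 0:
--             x //= p
--     return x == 1
--
--
-- def fft_next_good_size(n: int) -> int:
--     """smallest composite of 2, 3, 5, 7, 11 that is >= n (same contract as the original)"""
--     if n <= 6:
--         return n
--     c = n
--     while not _is_11_smooth(c):
--         c += 1
--     return c
-- ===== Notes on version B (the rewrite author's own statement) =====
-- stated objective: simpler
-- what changed: Replaces the five nested multiplicative while-loops tracking a running best with a linear upward scan from n that returns the first candidate passing a trial-division smoothness test over the same five primes.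
import Mathlib
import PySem

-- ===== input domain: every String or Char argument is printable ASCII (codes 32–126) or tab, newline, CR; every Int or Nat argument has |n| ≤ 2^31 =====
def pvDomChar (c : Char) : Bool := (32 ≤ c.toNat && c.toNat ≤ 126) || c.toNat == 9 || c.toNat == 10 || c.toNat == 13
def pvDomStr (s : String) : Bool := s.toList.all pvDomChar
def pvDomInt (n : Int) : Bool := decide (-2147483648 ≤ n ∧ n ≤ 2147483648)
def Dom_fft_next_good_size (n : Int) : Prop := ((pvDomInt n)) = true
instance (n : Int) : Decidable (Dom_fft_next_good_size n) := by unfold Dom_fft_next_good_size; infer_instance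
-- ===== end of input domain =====

-- B replaces A's five nested multiplicative loops with a linear upward scan from n using a
-- trial-division smoothness test over the same five primes; same return value, no speed claim.

-- ===== PORT A =====
-- A's five nested 'while f… < best' loops, innermost (×11) to outermost (×2).
-- The fuel parameter is a totality guard only: each loop multiplies f by ≥ 2 while
-- f < best ≤ 2n, so the fuel (2*n).toNat passed at the top is proven ample below.

def pvLoop11 (n : Int) (fuel : Nat) (f best : Int) : Int :=
  match fuel with
  | 0 => best
  | fuel + 1 => if f < best then pvLoop11 n fuel (f * 11) (if n ≤ f then f else best) else best

def pvLoop7 (n : Int) (fuel : Nat) (f best : Int) : Int :=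
  match fuel with
  | 0 => best
  | fuel + 1 => if f < best then pvLoop7 n fuel (f * 7) (pvLoop11 n (fuel + 1) f best) else best

def pvLoop5 (n : Int) (fuel : Nat) (f best : Int) : Int :=
  match fuel with
  | 0 => best
  | fuel + 1 => if f < best then pvLoop5 n fuel (f * 5) (pvLoop7 n (fuel + 1) f best) else best

def pvLoop3 (n : Int) (fuel : Nat) (f best : Int) : Int :=
  match fuel with
  | 0 => best
  | fuel + 1 => if f < best then pvLoop3 n fuel (f * 3) (pvLoop5 n (fuel + 1) f best) else best

def pvLoop2 (n : Int) (fuel : Nat) (f best : Int) : Int :=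
  match fuel with
  | 0 => best
  | fuel + 1 => if f < best then pvLoop2 n fuel (f * 2) (pvLoop3 n (fuel + 1) f best) else best

def fft_next_good_size (n : Int) : Int :=
  if n ≤ 6 then n else pvLoop2 n (2 * n).toNat 1 (2 * n)

-- ===== PORT B =====
-- 'while x % p == 0: x //= p'; the fuel x.toNat is a totality guard only (each
-- division shrinks a positive x by a factor ≥ 2, so it is ample; proven below).
def pvStrip (p x : Int) (fuel : Nat) : Int :=
  match fuel with
  | 0 => x
  | fuel + 1 => if PySem.Int.mod x p = 0 then pvStrip p (PySem.Int.floordiv x p) fuel else x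

-- 'for p in (2, 3, 5, 7, 11): …' then 'return x == 1'
def pvIsSmooth (x : Int) : Bool :=
  (List.foldl (fun acc p => pvStrip p acc acc.toNat) x [2, 3, 5, 7, 11]) == 1

-- 'while True' scan; fuel n.toNat + 1 is a totality guard, proven ample below
-- (a power of two lies in [n, 2n)).
def pvScan (c : Int) (fuel : Nat) : Int :=
  match fuel with
  | 0 => c
  | fuel + 1 => if pvIsSmooth c then c else pvScan (c + 1) fuel

def fft_next_good_size_alt (n : Int) : Int :=
  if n ≤ 6 then n else pvScan n (n.toNat + 1)

-- ===== PRECONDITION & SPEC =====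
def Spec_fft_next_good_size (n : Int) (out : Int) : Prop := out = fft_next_good_size_alt n
instance (n : Int) (out : Int) : Decidable (Spec_fft_next_good_size n out) := by unfold Spec_fft_next_good_size; infer_instance

-- ===== CLAIM (what is proved, stated in full; the proofs are below) =====
def Claim_equal_fft_next_good_size : Prop := ∀ (n : Int), Dom_fft_next_good_size n → Spec_fft_next_good_size n (fft_next_good_size n)

-- ===== LEMMAS AND PROOFS =====

-- products of the five primes
def IsProd (x : Int) : Prop := ∃ a b c d e : ℕ, x = 2 ^ a * 3 ^ b * 5 ^ c * 7 ^ d * 11 ^ e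

theorem le_mul5 (f u v w x y : Int) (hf : 0 < f) (hu : 1 ≤ u) (hv : 1 ≤ v) (hw : 1 ≤ w)
    (hx : 1 ≤ x) (hy : 1 ≤ y) : f ≤ f * u * v * w * x * y := by
  have p1 : 0 < f * u := mul_pos hf (by omega)
  have p2 : 0 < f * u * v := mul_pos p1 (by omega)
  have p3 : 0 < f * u * v * w := mul_pos p2 (by omega)
  have p4 : 0 < f * u * v * w * x := mul_pos p3 (by omega)
  calc f ≤ f * u := le_mul_of_one_le_right hf.le hu
    _ ≤ f * u * v := le_mul_of_one_le_right p1.le hv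
    _ ≤ f * u * v * w := le_mul_of_one_le_right p2.le hw
    _ ≤ f * u * v * w * x := le_mul_of_one_le_right p3.le hx
    _ ≤ f * u * v * w * x * y := le_mul_of_one_le_right p4.le hy

-- result never exceeds the incoming best
theorem pvLoop11_le (n : Int) : ∀ (fuel : Nat) (f best : Int), pvLoop11 n fuel f best ≤ best := by
  intro fuel
  induction fuel with
  | zero => intro f best; simp [pvLoop11]
  | succ fuel ih =>
      intro f best
      rw [pvLoop11]
      split
      · have := ih (f * 11) (if n ≤ f then f else best)
        have hb : (if n ≤ f then f else best) ≤ best := by split <;> omega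
        omega
      · omega

theorem pvLoop7_le (n : Int) : ∀ (fuel : Nat) (f best : Int), pvLoop7 n fuel f best ≤ best := by
  intro fuel
  induction fuel with
  | zero => intro f best; simp [pvLoop7]
  | succ fuel ih =>
      intro f best
      rw [pvLoop7]
      split
      · have := ih (f * 7) (pvLoop11 n (fuel + 1) f best)
        have := pvLoop11_le n (fuel + 1) f best
        omega
      · omega

theorem pvLoop5_le (n : Int) : ∀ (fuel : Nat) (f best : Int), pvLoop5 n fuel f best ≤ best := by
  intro fuel
  induction fuel with
  | zero => intro f best; simp [pvLoop5]
  | succ fuel ih =>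
      intro f best
      rw [pvLoop5]
      split
      · have := ih (f * 5) (pvLoop7 n (fuel + 1) f best)
        have := pvLoop7_le n (fuel + 1) f best
        omega
      · omega

theorem pvLoop3_le (n : Int) : ∀ (fuel : Nat) (f best : Int), pvLoop3 n fuel f best ≤ best := by
  intro fuel
  induction fuel with
  | zero => intro f best; simp [pvLoop3]
  | succ fuel ih =>
      intro f best
      rw [pvLoop3]
      split
      · have := ih (f * 3) (pvLoop5 n (fuel + 1) f best)
        have := pvLoop5_le n (fuel + 1) f best
        omega
      · omega

theorem pvLoop2_le (n : Int) : ∀ (fuel : Nat) (f best : Int), pvLoop2 n fuel f best ≤ best := by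
  intro fuel
  induction fuel with
  | zero => intro f best; simp [pvLoop2]
  | succ fuel ih =>
      intro f best
      rw [pvLoop2]
      split
      · have := ih (f * 2) (pvLoop3 n (fuel + 1) f best)
        have := pvLoop3_le n (fuel + 1) f best
        omega
      · omega

-- completeness chain: the pruned enumeration still reaches every smooth target below best
theorem pvLoop11_complete (n : Int) (e : ℕ) : ∀ (fuel : Nat) (f best : Int), 0 < f →
    n ≤ f * 11 ^ e → f * 11 ^ e < best → e < fuel → pvLoop11 n fuel f best ≤ f * 11 ^ e := by
  induction e with
  | zero =>
      intro fuel f best hf hn hb hfu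
      obtain ⟨fu, rfl⟩ : ∃ fu, fuel = fu + 1 := ⟨fuel - 1, by omega⟩
      simp only [pow_zero, mul_one] at hn hb ⊢
      rw [pvLoop11, if_pos hb, if_pos hn]
      exact pvLoop11_le n fu (f * 11) f
  | succ e ih =>
      intro fuel f best hf hn hb hfu
      obtain ⟨fu, rfl⟩ : ∃ fu, fuel = fu + 1 := ⟨fuel - 1, by omega⟩
      have hfm : f ≤ f * 11 ^ (e + 1) := by
        have := le_mul5 f (11 ^ (e + 1)) 1 1 1 1 hf (one_le_pow₀ (by norm_num))
          le_rfl le_rfl le_rfl le_rfl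
        simpa using this
      rw [pvLoop11, if_pos (by omega)]
      set best' := if n ≤ f then f else best with hbd
      have hble : best' ≤ best := by rw [hbd]; split <;> omega
      have heq : f * 11 * 11 ^ e = f * 11 ^ (e + 1) := by ring
      by_cases hm : f * 11 * 11 ^ e < best'
      · exact le_of_le_of_eq (ih fu (f * 11) best' (by omega) (by omega) hm (by omega)) heq
      · calc pvLoop11 n fu (f * 11) best' ≤ best' := pvLoop11_le _ _ _ _
          _ ≤ f * 11 ^ (e + 1) := by omega

theorem pvLoop7_complete (n : Int) (d e : ℕ) : ∀ (fuel : Nat) (f best : Int), 0 < f →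
    n ≤ f * 7 ^ d * 11 ^ e → f * 7 ^ d * 11 ^ e < best → d + e < fuel →
    pvLoop7 n fuel f best ≤ f * 7 ^ d * 11 ^ e := by
  induction d with
  | zero =>
      intro fuel f best hf hn hb hfu
      obtain ⟨fu, rfl⟩ : ∃ fu, fuel = fu + 1 := ⟨fuel - 1, by omega⟩
      simp only [pow_zero, mul_one] at hn hb ⊢
      have hfm : f ≤ f * 11 ^ e := by
        have := le_mul5 f (11 ^ e) 1 1 1 1 hf (one_le_pow₀ (by norm_num))
          le_rfl le_rfl le_rfl le_rfl
        simpa using this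
      rw [pvLoop7, if_pos (by omega)]
      have h1 := pvLoop11_complete n e (fu + 1) f best hf hn hb (by omega)
      calc pvLoop7 n fu (f * 7) (pvLoop11 n (fu + 1) f best) ≤ pvLoop11 n (fu + 1) f best :=
            pvLoop7_le _ _ _ _
        _ ≤ f * 11 ^ e := h1
  | succ d ih =>
      intro fuel f best hf hn hb hfu
      obtain ⟨fu, rfl⟩ : ∃ fu, fuel = fu + 1 := ⟨fuel - 1, by omega⟩
      have hfm : f ≤ f * 7 ^ (d + 1) * 11 ^ e := by
        have := le_mul5 f (7 ^ (d + 1)) (11 ^ e) 1 1 1 hf (one_le_pow₀ (by norm_num))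
          (one_le_pow₀ (by norm_num)) le_rfl le_rfl le_rfl
        simpa using this
      rw [pvLoop7, if_pos (by omega)]
      set best' := pvLoop11 n (fu + 1) f best with hbd
      have hble : best' ≤ best := pvLoop11_le _ _ _ _
      have heq : f * 7 * 7 ^ d * 11 ^ e = f * 7 ^ (d + 1) * 11 ^ e := by ring
      by_cases hm : f * 7 * 7 ^ d * 11 ^ e < best'
      · exact le_of_le_of_eq (ih fu (f * 7) best' (by omega) (by omega) hm (by omega)) heq
      · calc pvLoop7 n fu (f * 7) best' ≤ best' := pvLoop7_le _ _ _ _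
          _ ≤ f * 7 ^ (d + 1) * 11 ^ e := by omega

theorem pvLoop5_complete (n : Int) (c d e : ℕ) : ∀ (fuel : Nat) (f best : Int), 0 < f →
    n ≤ f * 5 ^ c * 7 ^ d * 11 ^ e → f * 5 ^ c * 7 ^ d * 11 ^ e < best → c + d + e < fuel →
    pvLoop5 n fuel f best ≤ f * 5 ^ c * 7 ^ d * 11 ^ e := by
  induction c with
  | zero =>
      intro fuel f best hf hn hb hfu
      obtain ⟨fu, rfl⟩ : ∃ fu, fuel = fu + 1 := ⟨fuel - 1, by omega⟩
      simp only [pow_zero, mul_one] at hn hb ⊢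
      have hfm : f ≤ f * 7 ^ d * 11 ^ e := by
        have := le_mul5 f (7 ^ d) (11 ^ e) 1 1 1 hf (one_le_pow₀ (by norm_num))
          (one_le_pow₀ (by norm_num)) le_rfl le_rfl le_rfl
        simpa using this
      rw [pvLoop5, if_pos (by omega)]
      have h1 := pvLoop7_complete n d e (fu + 1) f best hf hn hb (by omega)
      calc pvLoop5 n fu (f * 5) (pvLoop7 n (fu + 1) f best) ≤ pvLoop7 n (fu + 1) f best :=
            pvLoop5_le _ _ _ _
        _ ≤ f * 7 ^ d * 11 ^ e := h1
  | succ c ih =>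
      intro fuel f best hf hn hb hfu
      obtain ⟨fu, rfl⟩ : ∃ fu, fuel = fu + 1 := ⟨fuel - 1, by omega⟩
      have hfm : f ≤ f * 5 ^ (c + 1) * 7 ^ d * 11 ^ e := by
        have := le_mul5 f (5 ^ (c + 1)) (7 ^ d) (11 ^ e) 1 1 hf (one_le_pow₀ (by norm_num))
          (one_le_pow₀ (by norm_num)) (one_le_pow₀ (by norm_num)) le_rfl le_rfl
        simpa using this
      rw [pvLoop5, if_pos (by omega)]
      set best' := pvLoop7 n (fu + 1) f best with hbd
      have hble : best' ≤ best := pvLoop7_le _ _ _ _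
      have heq : f * 5 * 5 ^ c * 7 ^ d * 11 ^ e = f * 5 ^ (c + 1) * 7 ^ d * 11 ^ e := by ring
      by_cases hm : f * 5 * 5 ^ c * 7 ^ d * 11 ^ e < best'
      · exact le_of_le_of_eq (ih fu (f * 5) best' (by omega) (by omega) hm (by omega)) heq
      · calc pvLoop5 n fu (f * 5) best' ≤ best' := pvLoop5_le _ _ _ _
          _ ≤ f * 5 ^ (c + 1) * 7 ^ d * 11 ^ e := by omega

theorem pvLoop3_complete (n : Int) (b c d e : ℕ) : ∀ (fuel : Nat) (f best : Int), 0 < f →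
    n ≤ f * 3 ^ b * 5 ^ c * 7 ^ d * 11 ^ e → f * 3 ^ b * 5 ^ c * 7 ^ d * 11 ^ e < best →
    b + c + d + e < fuel → pvLoop3 n fuel f best ≤ f * 3 ^ b * 5 ^ c * 7 ^ d * 11 ^ e := by
  induction b with
  | zero =>
      intro fuel f best hf hn hb hfu
      obtain ⟨fu, rfl⟩ : ∃ fu, fuel = fu + 1 := ⟨fuel - 1, by omega⟩
      simp only [pow_zero, mul_one] at hn hb ⊢
      have hfm : f ≤ f * 5 ^ c * 7 ^ d * 11 ^ e := by
        have := le_mul5 f (5 ^ c) (7 ^ d) (11 ^ e) 1 1 hf (one_le_pow₀ (by norm_num))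
          (one_le_pow₀ (by norm_num)) (one_le_pow₀ (by norm_num)) le_rfl le_rfl
        simpa using this
      rw [pvLoop3, if_pos (by omega)]
      have h1 := pvLoop5_complete n c d e (fu + 1) f best hf hn hb (by omega)
      calc pvLoop3 n fu (f * 3) (pvLoop5 n (fu + 1) f best) ≤ pvLoop5 n (fu + 1) f best :=
            pvLoop3_le _ _ _ _
        _ ≤ f * 5 ^ c * 7 ^ d * 11 ^ e := h1
  | succ b ih =>
      intro fuel f best hf hn hb hfu
      obtain ⟨fu, rfl⟩ : ∃ fu, fuel = fu + 1 := ⟨fuel - 1, by omega⟩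
      have hfm : f ≤ f * 3 ^ (b + 1) * 5 ^ c * 7 ^ d * 11 ^ e := by
        have := le_mul5 f (3 ^ (b + 1)) (5 ^ c) (7 ^ d) (11 ^ e) 1 hf (one_le_pow₀ (by norm_num))
          (one_le_pow₀ (by norm_num)) (one_le_pow₀ (by norm_num)) (one_le_pow₀ (by norm_num)) le_rfl
        simpa using this
      rw [pvLoop3, if_pos (by omega)]
      set best' := pvLoop5 n (fu + 1) f best with hbd
      have hble : best' ≤ best := pvLoop5_le _ _ _ _
      have heq : f * 3 * 3 ^ b * 5 ^ c * 7 ^ d * 11 ^ e = f * 3 ^ (b + 1) * 5 ^ c * 7 ^ d * 11 ^ e := by ring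
      by_cases hm : f * 3 * 3 ^ b * 5 ^ c * 7 ^ d * 11 ^ e < best'
      · exact le_of_le_of_eq (ih fu (f * 3) best' (by omega) (by omega) hm (by omega)) heq
      · calc pvLoop3 n fu (f * 3) best' ≤ best' := pvLoop3_le _ _ _ _
          _ ≤ f * 3 ^ (b + 1) * 5 ^ c * 7 ^ d * 11 ^ e := by omega

theorem pvLoop2_complete (n : Int) (a b c d e : ℕ) : ∀ (fuel : Nat) (f best : Int), 0 < f →
    n ≤ f * 2 ^ a * 3 ^ b * 5 ^ c * 7 ^ d * 11 ^ e →
    f * 2 ^ a * 3 ^ b * 5 ^ c * 7 ^ d * 11 ^ e < best → a + b + c + d + e < fuel →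
    pvLoop2 n fuel f best ≤ f * 2 ^ a * 3 ^ b * 5 ^ c * 7 ^ d * 11 ^ e := by
  induction a with
  | zero =>
      intro fuel f best hf hn hb hfu
      obtain ⟨fu, rfl⟩ : ∃ fu, fuel = fu + 1 := ⟨fuel - 1, by omega⟩
      simp only [pow_zero, mul_one] at hn hb ⊢
      have hfm : f ≤ f * 3 ^ b * 5 ^ c * 7 ^ d * 11 ^ e := by
        have := le_mul5 f (3 ^ b) (5 ^ c) (7 ^ d) (11 ^ e) 1 hf (one_le_pow₀ (by norm_num))
          (one_le_pow₀ (by norm_num)) (one_le_pow₀ (by norm_num)) (one_le_pow₀ (by norm_num)) le_rfl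
        simpa using this
      rw [pvLoop2, if_pos (by omega)]
      have h1 := pvLoop3_complete n b c d e (fu + 1) f best hf hn hb (by omega)
      calc pvLoop2 n fu (f * 2) (pvLoop3 n (fu + 1) f best) ≤ pvLoop3 n (fu + 1) f best :=
            pvLoop2_le _ _ _ _
        _ ≤ f * 3 ^ b * 5 ^ c * 7 ^ d * 11 ^ e := h1
  | succ a ih =>
      intro fuel f best hf hn hb hfu
      obtain ⟨fu, rfl⟩ : ∃ fu, fuel = fu + 1 := ⟨fuel - 1, by omega⟩
      have hfm : f ≤ f * 2 ^ (a + 1) * 3 ^ b * 5 ^ c * 7 ^ d * 11 ^ e :=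
        le_mul5 f (2 ^ (a + 1)) (3 ^ b) (5 ^ c) (7 ^ d) (11 ^ e) hf (one_le_pow₀ (by norm_num))
          (one_le_pow₀ (by norm_num)) (one_le_pow₀ (by norm_num)) (one_le_pow₀ (by norm_num))
          (one_le_pow₀ (by norm_num))
      rw [pvLoop2, if_pos (by omega)]
      set best' := pvLoop3 n (fu + 1) f best with hbd
      have hble : best' ≤ best := pvLoop3_le _ _ _ _
      have heq : f * 2 * 2 ^ a * 3 ^ b * 5 ^ c * 7 ^ d * 11 ^ e = f * 2 ^ (a + 1) * 3 ^ b * 5 ^ c * 7 ^ d * 11 ^ e := by ring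
      by_cases hm : f * 2 * 2 ^ a * 3 ^ b * 5 ^ c * 7 ^ d * 11 ^ e < best'
      · exact le_of_le_of_eq (ih fu (f * 2) best' (by omega) (by omega) hm (by omega)) heq
      · calc pvLoop2 n fu (f * 2) best' ≤ best' := pvLoop2_le _ _ _ _
          _ ≤ f * 2 ^ (a + 1) * 3 ^ b * 5 ^ c * 7 ^ d * 11 ^ e := by omega

-- soundness chain: best is only ever replaced by a smooth number ≥ n
theorem pvLoop11_sound (n : Int) : ∀ (fuel : Nat) (f best : Int), IsProd f →
    pvLoop11 n fuel f best = best ∨ (n ≤ pvLoop11 n fuel f best ∧ IsProd (pvLoop11 n fuel f best)) := by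
  intro fuel
  induction fuel with
  | zero => intro f best _; left; rfl
  | succ fuel ih =>
      intro f best hf
      rw [pvLoop11]
      split
      · have hf11 : IsProd (f * 11) := by
          obtain ⟨a, b, c, d, e, rfl⟩ := hf
          exact ⟨a, b, c, d, e + 1, by ring⟩
        rcases ih (f * 11) (if n ≤ f then f else best) hf11 with heq | hgood
        · rw [heq]
          split
          · right; exact ⟨by assumption, hf⟩
          · left; rfl
        · right; exact hgood
      · left; rfl

theorem pvLoop7_sound (n : Int) : ∀ (fuel : Nat) (f best : Int), IsProd f →
    pvLoop7 n fuel f best = best ∨ (n ≤ pvLoop7 n fuel f best ∧ IsProd (pvLoop7 n fuel f best)) := by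
  intro fuel
  induction fuel with
  | zero => intro f best _; left; rfl
  | succ fuel ih =>
      intro f best hf
      rw [pvLoop7]
      split
      · have hf7 : IsProd (f * 7) := by
          obtain ⟨a, b, c, d, e, rfl⟩ := hf
          exact ⟨a, b, c, d + 1, e, by ring⟩
        rcases ih (f * 7) (pvLoop11 n (fuel + 1) f best) hf7 with heq | hgood
        · rw [heq]
          exact pvLoop11_sound n (fuel + 1) f best hf
        · right; exact hgood
      · left; rfl

theorem pvLoop5_sound (n : Int) : ∀ (fuel : Nat) (f best : Int), IsProd f →
    pvLoop5 n fuel f best = best ∨ (n ≤ pvLoop5 n fuel f best ∧ IsProd (pvLoop5 n fuel f best)) := by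
  intro fuel
  induction fuel with
  | zero => intro f best _; left; rfl
  | succ fuel ih =>
      intro f best hf
      rw [pvLoop5]
      split
      · have hf5 : IsProd (f * 5) := by
          obtain ⟨a, b, c, d, e, rfl⟩ := hf
          exact ⟨a, b, c + 1, d, e, by ring⟩
        rcases ih (f * 5) (pvLoop7 n (fuel + 1) f best) hf5 with heq | hgood
        · rw [heq]
          exact pvLoop7_sound n (fuel + 1) f best hf
        · right; exact hgood
      · left; rfl

theorem pvLoop3_sound (n : Int) : ∀ (fuel : Nat) (f best : Int), IsProd f →
    pvLoop3 n fuel f best = best ∨ (n ≤ pvLoop3 n fuel f best ∧ IsProd (pvLoop3 n fuel f best)) := by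
  intro fuel
  induction fuel with
  | zero => intro f best _; left; rfl
  | succ fuel ih =>
      intro f best hf
      rw [pvLoop3]
      split
      · have hf3 : IsProd (f * 3) := by
          obtain ⟨a, b, c, d, e, rfl⟩ := hf
          exact ⟨a, b + 1, c, d, e, by ring⟩
        rcases ih (f * 3) (pvLoop5 n (fuel + 1) f best) hf3 with heq | hgood
        · rw [heq]
          exact pvLoop5_sound n (fuel + 1) f best hf
        · right; exact hgood
      · left; rfl

theorem pvLoop2_sound (n : Int) : ∀ (fuel : Nat) (f best : Int), IsProd f →
    pvLoop2 n fuel f best = best ∨ (n ≤ pvLoop2 n fuel f best ∧ IsProd (pvLoop2 n fuel f best)) := by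
  intro fuel
  induction fuel with
  | zero => intro f best _; left; rfl
  | succ fuel ih =>
      intro f best hf
      rw [pvLoop2]
      split
      · have hf2 : IsProd (f * 2) := by
          obtain ⟨a, b, c, d, e, rfl⟩ := hf
          exact ⟨a + 1, b, c, d, e, by ring⟩
        rcases ih (f * 2) (pvLoop3 n (fuel + 1) f best) hf2 with heq | hgood
        · rw [heq]
          exact pvLoop3_sound n (fuel + 1) f best hf
        · right; exact hgood
      · left; rfl

-- pvStrip facts
theorem pvStrip_pow (p : Int) (hp : 1 < p) : ∀ (k : ℕ) (y : Int) (fuel : Nat), 0 < y → ¬ p ∣ y →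
    k ≤ fuel → pvStrip p (p ^ k * y) fuel = y := by
  intro k
  induction k with
  | zero =>
      intro y fuel hy hd _
      match fuel with
      | 0 => simp [pvStrip]
      | fuel + 1 =>
          rw [pvStrip, if_neg, pow_zero, one_mul]
          intro hmod
          rw [PySem.Int.mod_eq_zero_iff_dvd] at hmod
          simp only [pow_zero, one_mul] at hmod
          exact hd hmod
  | succ k ih =>
      intro y fuel hy hd hfu
      obtain ⟨fu, rfl⟩ : ∃ fu, fuel = fu + 1 := ⟨fuel - 1, by omega⟩
      have hdv : p ∣ p ^ (k + 1) * y := ⟨p ^ k * y, by ring⟩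
      rw [pvStrip, if_pos ((PySem.Int.mod_eq_zero_iff_dvd _ _).mpr hdv)]
      have hdiv : PySem.Int.floordiv (p ^ (k + 1) * y) p = p ^ k * y := by
        rw [PySem.Int.floordiv_eq_ediv_of_pos (by omega)]
        rw [show p ^ (k + 1) * y = (p ^ k * y) * p by ring]
        exact Int.mul_ediv_cancel _ (by omega)
      rw [hdiv]
      exact ih y fu hy hd (by omega)

theorem pvStrip_decomp (p : Int) (hp : 1 < p) :
    ∀ N : ℕ, ∀ x : Int, 0 < x → x.toNat ≤ N →
      ∃ (k : ℕ) (y : Int), x = p ^ k * y ∧ 0 < y ∧ ¬ p ∣ y ∧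
        ∀ fuel : Nat, x.toNat ≤ fuel → pvStrip p x fuel = y := by
  intro N
  induction N with
  | zero => intro x hx hle; omega
  | succ N ih =>
      intro x hx hle
      by_cases hd : p ∣ x
      · have hm : PySem.Int.mod x p = 0 := (PySem.Int.mod_eq_zero_iff_dvd x p).mpr hd
        obtain ⟨t, ht⟩ := hd
        have ht0 : 0 < t := by
          by_contra hc
          push_neg at hc
          have := mul_nonpos_of_nonneg_of_nonpos (by omega : (0:Int) ≤ p) hc
          omega
        have htlt : t < x := by rw [ht]; nlinarith
        have hfd : PySem.Int.floordiv x p = t := by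
          rw [PySem.Int.floordiv_eq_ediv_of_pos (by omega), ht]
          exact Int.mul_ediv_cancel_left t (by omega)
        obtain ⟨k, y, hky, hy0, hyd, hys⟩ := ih t ht0 (by omega)
        refine ⟨k + 1, y, by rw [ht, hky]; ring, hy0, hyd, ?_⟩
        intro fuel hfu
        obtain ⟨fu, rfl⟩ : ∃ fu, fuel = fu + 1 := ⟨fuel - 1, by omega⟩
        rw [pvStrip, if_pos hm, hfd]
        exact hys fu (by omega)
      · refine ⟨0, x, by simp, hx, hd, ?_⟩
        intro fuel hfu
        obtain ⟨fu, rfl⟩ : ∃ fu, fuel = fu + 1 := ⟨fuel - 1, by omega⟩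
        rw [pvStrip, if_neg]
        intro hmod
        exact hd ((PySem.Int.mod_eq_zero_iff_dvd x p).mp hmod)

theorem not_dvd_pow_mul {p q r : Int} (hp : Prime p) (hq : ¬ p ∣ q) (hr : ¬ p ∣ r) (k : ℕ) :
    ¬ p ∣ q ^ k * r := by
  intro hd
  rcases hp.dvd_mul.mp hd with h | h
  · exact hq (hp.dvd_of_dvd_pow h)
  · exact hr h

-- the exponent is small against the value: k < p^k * y for 2 ≤ p, 1 ≤ y
theorem exp_lt_val (p : Int) (hp : 2 ≤ p) (k : ℕ) (y : Int) (hy : 1 ≤ y) : (k : Int) < p ^ k * y := by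
  have h1 : (k : Int) < 2 ^ k := by exact_mod_cast Nat.lt_two_pow_self
  have h2 : (2:Int) ^ k ≤ p ^ k := pow_le_pow_left₀ (by norm_num) hp k
  have h3 : p ^ k ≤ p ^ k * y := le_mul_of_one_le_right (by positivity) hy
  omega

theorem smooth_of_IsProd (x : Int) (hx : IsProd x) : pvIsSmooth x = true := by
  obtain ⟨a, b, c, d, e, rfl⟩ := hx
  have p2 : Prime (2:ℤ) := Int.prime_two
  have p3 : Prime (3:ℤ) := Int.prime_three
  have p5 : Prime (5:ℤ) := by norm_num
  have p7 : Prime (7:ℤ) := by norm_num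
  have p11 : Prime (11:ℤ) := by norm_num
  have h11 : ¬ (11:ℤ) ∣ 1 := by norm_num
  have h7 : ¬ (7:ℤ) ∣ 11 ^ e * 1 := not_dvd_pow_mul p7 (by norm_num) (by norm_num) e
  have h5' : ¬ (5:ℤ) ∣ 11 ^ e * 1 := not_dvd_pow_mul p5 (by norm_num) (by norm_num) e
  have h5 : ¬ (5:ℤ) ∣ 7 ^ d * (11 ^ e * 1) := not_dvd_pow_mul p5 (by norm_num) h5' d
  have h3'' : ¬ (3:ℤ) ∣ 11 ^ e * 1 := not_dvd_pow_mul p3 (by norm_num) (by norm_num) e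
  have h3' : ¬ (3:ℤ) ∣ 7 ^ d * (11 ^ e * 1) := not_dvd_pow_mul p3 (by norm_num) h3'' d
  have h3 : ¬ (3:ℤ) ∣ 5 ^ c * (7 ^ d * (11 ^ e * 1)) := not_dvd_pow_mul p3 (by norm_num) h3' c
  have h2''' : ¬ (2:ℤ) ∣ 11 ^ e * 1 := not_dvd_pow_mul p2 (by norm_num) (by norm_num) e
  have h2'' : ¬ (2:ℤ) ∣ 7 ^ d * (11 ^ e * 1) := not_dvd_pow_mul p2 (by norm_num) h2''' d
  have h2' : ¬ (2:ℤ) ∣ 5 ^ c * (7 ^ d * (11 ^ e * 1)) := not_dvd_pow_mul p2 (by norm_num) h2'' c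
  have h2 : ¬ (2:ℤ) ∣ 3 ^ b * (5 ^ c * (7 ^ d * (11 ^ e * 1))) := not_dvd_pow_mul p2 (by norm_num) h2' b
  have pos4 : (0:ℤ) < 11 ^ e * 1 := by positivity
  have pos3 : (0:ℤ) < 7 ^ d * (11 ^ e * 1) := by positivity
  have pos2 : (0:ℤ) < 5 ^ c * (7 ^ d * (11 ^ e * 1)) := by positivity
  have pos1 : (0:ℤ) < 3 ^ b * (5 ^ c * (7 ^ d * (11 ^ e * 1))) := by positivity
  have s2 : pvStrip 2 ((2:ℤ) ^ a * (3 ^ b * (5 ^ c * (7 ^ d * (11 ^ e * 1)))))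
      ((2 ^ a * (3 ^ b * (5 ^ c * (7 ^ d * (11 ^ e * 1)))) : ℤ).toNat)
      = 3 ^ b * (5 ^ c * (7 ^ d * (11 ^ e * 1))) := by
    refine pvStrip_pow 2 (by norm_num) a _ _ pos1 h2 ?_
    have := exp_lt_val 2 (by norm_num) a _ pos1
    omega
  have s3 : pvStrip 3 ((3:ℤ) ^ b * (5 ^ c * (7 ^ d * (11 ^ e * 1))))
      ((3 ^ b * (5 ^ c * (7 ^ d * (11 ^ e * 1))) : ℤ).toNat)
      = 5 ^ c * (7 ^ d * (11 ^ e * 1)) := by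
    refine pvStrip_pow 3 (by norm_num) b _ _ pos2 h3 ?_
    have := exp_lt_val 3 (by norm_num) b _ pos2
    omega
  have s5 : pvStrip 5 ((5:ℤ) ^ c * (7 ^ d * (11 ^ e * 1)))
      ((5 ^ c * (7 ^ d * (11 ^ e * 1)) : ℤ).toNat) = 7 ^ d * (11 ^ e * 1) := by
    refine pvStrip_pow 5 (by norm_num) c _ _ pos3 h5 ?_
    have := exp_lt_val 5 (by norm_num) c _ pos3
    omega
  have s7 : pvStrip 7 ((7:ℤ) ^ d * (11 ^ e * 1)) ((7 ^ d * (11 ^ e * 1) : ℤ).toNat)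
      = 11 ^ e * 1 := by
    refine pvStrip_pow 7 (by norm_num) d _ _ pos4 h7 ?_
    have := exp_lt_val 7 (by norm_num) d _ pos4
    omega
  have s11 : pvStrip 11 ((11:ℤ) ^ e * 1) ((11 ^ e * 1 : ℤ).toNat) = 1 := by
    refine pvStrip_pow 11 (by norm_num) e 1 _ one_pos h11 ?_
    have := exp_lt_val 11 (by norm_num) e 1 le_rfl
    omega
  have hxe : (2:ℤ) ^ a * 3 ^ b * 5 ^ c * 7 ^ d * 11 ^ e =
      2 ^ a * (3 ^ b * (5 ^ c * (7 ^ d * (11 ^ e * 1)))) := by ring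
  simp only [pvIsSmooth, List.foldl, hxe, s2, s3, s5, s7, s11]
  rfl

theorem IsProd_of_smooth (x : Int) (hx : 0 < x) (hs : pvIsSmooth x = true) : IsProd x := by
  obtain ⟨a, y1, he1, hp1, _, hs1⟩ := pvStrip_decomp 2 (by norm_num) x.toNat x hx le_rfl
  obtain ⟨b, y2, he2, hp2, _, hs2⟩ := pvStrip_decomp 3 (by norm_num) y1.toNat y1 hp1 le_rfl
  obtain ⟨c, y3, he3, hp3, _, hs3⟩ := pvStrip_decomp 5 (by norm_num) y2.toNat y2 hp2 le_rfl
  obtain ⟨d, y4, he4, hp4, _, hs4⟩ := pvStrip_decomp 7 (by norm_num) y3.toNat y3 hp3 le_rfl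
  obtain ⟨e, y5, he5, hp5, _, hs5⟩ := pvStrip_decomp 11 (by norm_num) y4.toNat y4 hp4 le_rfl
  have hy5 : y5 = 1 := by
    simp only [pvIsSmooth, List.foldl, hs1 x.toNat le_rfl, hs2 y1.toNat le_rfl,
      hs3 y2.toNat le_rfl, hs4 y3.toNat le_rfl, hs5 y4.toNat le_rfl, beq_iff_eq] at hs
    exact hs
  exact ⟨a, b, c, d, e, by rw [he1, he2, he3, he4, he5, hy5]; ring⟩

-- power of two in [n, 2n)
theorem exists_pow2 (n : Int) (hn : 7 ≤ n) : ∃ k : ℕ, n ≤ 2 ^ k ∧ 2 ^ k < 2 * n := by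
  have hN : 7 ≤ n.toNat := by omega
  refine ⟨Nat.log 2 (n.toNat - 1) + 1, ?_, ?_⟩
  all_goals {
    have h1 : n.toNat - 1 < 2 ^ (Nat.log 2 (n.toNat - 1) + 1) :=
      Nat.lt_pow_succ_log_self (by norm_num) (n.toNat - 1)
    have h2 : 2 ^ Nat.log 2 (n.toNat - 1) ≤ n.toNat - 1 :=
      Nat.pow_log_le_self 2 (by omega)
    have h3 : 2 ^ (Nat.log 2 (n.toNat - 1) + 1) = 2 ^ Nat.log 2 (n.toNat - 1) * 2 :=
      pow_succ 2 _
    have hcast : ((2:ℤ)) ^ (Nat.log 2 (n.toNat - 1) + 1) =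
        ((2 ^ (Nat.log 2 (n.toNat - 1) + 1) : ℕ) : ℤ) := by push_cast; ring
    have hn' : n = (n.toNat : ℤ) := by omega
    rw [hcast, hn']
    first
      | exact_mod_cast (by omega : n.toNat ≤ 2 ^ (Nat.log 2 (n.toNat - 1) + 1))
      | exact_mod_cast (by omega : 2 ^ (Nat.log 2 (n.toNat - 1) + 1) < 2 * n.toNat)
  }

-- the exponent sum of a smooth number below 2n is below the fuel (2n).toNat
theorem expsum_lt (n : Int) (a b c d e : ℕ)
    (hb : (2:ℤ) ^ a * 3 ^ b * 5 ^ c * 7 ^ d * 11 ^ e < 2 * n) :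
    a + b + c + d + e < (2 * n).toNat := by
  have hps : (2:ℤ) ^ (a + b + c + d + e) = 2 ^ a * 2 ^ b * 2 ^ c * 2 ^ d * 2 ^ e := by
    rw [pow_add, pow_add, pow_add, pow_add]
  have hmono : (2:ℤ) ^ a * 2 ^ b * 2 ^ c * 2 ^ d * 2 ^ e ≤ 2 ^ a * 3 ^ b * 5 ^ c * 7 ^ d * 11 ^ e := by
    gcongr <;> norm_num
  have hlt : ((a + b + c + d + e : ℕ) : ℤ) < 2 ^ (a + b + c + d + e) := by
    exact_mod_cast Nat.lt_two_pow_self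
  omega

theorem pvScan_spec (fuel : ℕ) : ∀ c r : Int, pvIsSmooth r = true → c ≤ r →
    (∀ x, c ≤ x → x < r → pvIsSmooth x = false) → (r - c).toNat < fuel → pvScan c fuel = r := by
  induction fuel with
  | zero => intro c r _ _ _ h; omega
  | succ fuel ih =>
      intro c r hr hcr hall hfuel
      rw [pvScan]
      by_cases hc : pvIsSmooth c = true
      · have hceq : c = r := by
          by_contra hne
          have := hall c le_rfl (by omega)
          rw [hc] at this
          exact absurd this (by simp)
        rw [if_pos hc, hceq]
      · have hclt : c < r := by
          rcases lt_or_eq_of_le hcr with h | h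
          · exact h
          · rw [h] at hc; exact absurd hr hc
        rw [if_neg hc]
        exact ih (c + 1) r hr (by omega) (fun x hx1 hx2 => hall x (by omega) hx2) (by omega)

-- the main assembly: for n ≥ 7 both sides are the least such smooth number ≥ n
theorem main_eq (n : Int) (hn : 7 ≤ n) :
    pvLoop2 n (2 * n).toNat 1 (2 * n) = pvScan n (n.toNat + 1) := by
  obtain ⟨k, hk1, hk2⟩ := exists_pow2 n hn
  set r := pvLoop2 n (2 * n).toNat 1 (2 * n) with hr
  have hkfu : k + 0 + 0 + 0 + 0 < (2 * n).toNat := by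
    have := expsum_lt n k 0 0 0 0 (by simpa using hk2)
    omega
  have hcompk : r ≤ 2 ^ k := by
    have := pvLoop2_complete n k 0 0 0 0 (2 * n).toNat 1 (2 * n) (by norm_num)
      (by simpa using hk1) (by simpa using hk2) hkfu
    simpa using this
  have hsound := pvLoop2_sound n (2 * n).toNat 1 (2 * n) ⟨0, 0, 0, 0, 0, by ring⟩
  rw [← hr] at hsound
  have hgood : n ≤ r ∧ IsProd r := by
    rcases hsound with heq | hgood
    · exfalso; omega
    · exact hgood
  obtain ⟨hnr, hprodr⟩ := hgood
  have hcomp : ∀ x, n ≤ x → x < r → pvIsSmooth x = false := by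
    intro x hx1 hx2
    by_contra hsm
    rw [Bool.not_eq_false] at hsm
    obtain ⟨a, b, c, d, e, rfl⟩ := IsProd_of_smooth x (by omega) hsm
    have hxlt : (2:ℤ) ^ a * 3 ^ b * 5 ^ c * 7 ^ d * 11 ^ e < 2 * n := by omega
    have := pvLoop2_complete n a b c d e (2 * n).toNat 1 (2 * n) (by norm_num)
      (by simpa using hx1) (by simpa using hxlt) (expsum_lt n a b c d e hxlt)
    simp only [one_mul] at this
    omega
  exact (pvScan_spec (n.toNat + 1) n r (smooth_of_IsProd r hprodr) hnr hcomp (by omega)).symm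

-- ===== VERDICT (by name: the statement is the Claim_ definition above) =====
theorem fft_next_good_size_spec : Claim_equal_fft_next_good_size := by
  intro n _
  unfold Spec_fft_next_good_size fft_next_good_size fft_next_good_size_alt
  by_cases h : n ≤ 6
  · simp [h]
  · rw [if_neg h, if_neg h]
    exact main_eq n (by omega)
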